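-- pv_equiv track=rewrite | github.com/FangYouzheng/CS243-Final-Project | code/DNA-MU-R.py | build_idt
-- ===== SOURCE A (Python) =====
-- def build_idt(parent):
--     # 构建邀约支配树(subtree)
--     children = {}
--     for i, p in parent.items():
--         children.setdefault(p, []).append(i)
--     def dfs(u):
--         s = {u}
--         for v in children.get(u, []):
--             s |= dfs(v)
--         return s
--     return {i: dfs(i) for i in parent}
-- ===== SOURCE B (Python) =====
-- def build_idt(parent):
--     # Memoized bottom-up: compute each node's depth, then process nodes level by
--     # level from the deepest up, so each subtree set is the union of the already
--     # cached children sets -- each set is computed exactly once.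
--     children = {}
--     for i, p in parent.items():
--         children.setdefault(p, []).append(i)
--
--     def depth(u):
--         n = 0
--         while u in parent:
--             u = parent[u]
--             n += 1
--         return n
--
--     dep = {i: depth(i) for i in parent}
--     memo = {}
--     for lev in range(max(dep.values(), default=0), -1, -1):
--         for u in parent:
--             if dep[u] == lev:
--                 s = {u}
--                 for v in children.get(u, []):
--                     s |= memo[v]
--                 memo[u] = s
--     return {i: memo[i] for i in parent}
-- ===== Notes on version B (the rewrite author's own statement) =====
-- stated objective: alternative
-- what changed: A recomputes each node's descendant set with a fresh recursive DFS that rebuilds and re-unions every child subtree from scratch for every root; B computes each node's depth by climbing the parent chain, then fills a memo table level by level from the deepest nodes up, so each subtree set is formed once as the union of the already cached children sets.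
import Mathlib
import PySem

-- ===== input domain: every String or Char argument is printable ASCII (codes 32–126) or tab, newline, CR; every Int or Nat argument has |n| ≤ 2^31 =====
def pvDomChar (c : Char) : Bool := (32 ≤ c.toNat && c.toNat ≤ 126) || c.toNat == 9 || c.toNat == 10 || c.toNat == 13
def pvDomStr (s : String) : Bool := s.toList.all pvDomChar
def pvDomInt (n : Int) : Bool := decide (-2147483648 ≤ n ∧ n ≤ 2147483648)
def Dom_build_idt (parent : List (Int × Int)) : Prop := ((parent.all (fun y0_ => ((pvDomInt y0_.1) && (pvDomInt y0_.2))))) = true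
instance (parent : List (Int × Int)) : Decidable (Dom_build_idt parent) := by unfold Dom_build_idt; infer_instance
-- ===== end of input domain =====

-- B replaces A's per-node recursive set-union DFS by a memoized bottom-up pass:
-- depths are computed by climbing the parent chain, nodes are processed level by
-- level from the deepest up, and each subtree set is the union of the already
-- cached children sets (objective 'alternative': a different algorithm, no speed claim).

-- ===== PORT A =====
-- the parameter is a Python dict, received as its pair list: normalize to a Dict
def pvDictOf (parent : List (Int × Int)) : PySem.Dict Int Int := PySem.Dict.ofList parent

-- children.setdefault(p, []).append(i)  ==  children[p] = children.get(p, []) + [i]  ==  Dict.modify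
-- (both Source A and Source B build this map with the identical two lines; the helper is shared)
def pvChildren (d : PySem.Dict Int Int) : PySem.Dict Int (List Int) :=
  d.items.foldl (fun ch ip => ch.modify ip.2 [] (fun l => l ++ [ip.1])) PySem.Dict.empty

-- A's recursive dfs; the Nat is a fuel bound never reached under Pre_ (acyclic input)
def pvDfsA (ch : PySem.Dict Int (List Int)) : Nat → Int → PySem.Set Int
  | 0, u => PySem.Set.ofList [u]
  | f+1, u => (ch.getD u []).foldl (fun s v => PySem.Set.union s (pvDfsA ch f v)) (PySem.Set.ofList [u])

def build_idt (parent : List (Int × Int)) : List (Int × List Int) :=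
  let d := pvDictOf parent
  let ch := pvChildren d
  (d.keys.foldl (fun out i => out.insert i (pvDfsA ch (d.keys.length + 1) i))
      (PySem.Dict.empty : PySem.Dict Int (List Int))).items

-- ===== PORT B =====
-- Source B's depth(u): climb the parent chain counting steps until u leaves the dict.
-- The Nat is a fuel bound; under Pre_ (acyclic input) the chain leaves within
-- |keys| steps, so the fuel is never exhausted (in Python the loop just runs out).
def pvDepth (d : PySem.Dict Int Int) : Nat → Int → Nat
  | 0, _ => 0
  | f+1, u => match d.get? u with
      | none => 0
      | some p => pvDepth d f p + 1

-- one iteration of Source B's outer 'for lev in range(...)' loop: the inner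
-- 'for u in parent: if dep[u] == lev: ...' scan.  memo[v] always exists when read
-- under Pre_ (children sit one level deeper, hence were cached earlier), so the
-- KeyError-free lookup is ported as getD.
def pvLevelPass (ch : PySem.Dict Int (List Int)) (dep : PySem.Dict Int Nat)
    (ks : List Int) (lev : Nat) (memo : PySem.Dict Int (PySem.Set Int)) :
    PySem.Dict Int (PySem.Set Int) :=
  ks.foldl (fun memo u =>
    if dep.getD u 0 == lev then
      memo.insert u ((ch.getD u []).foldl
        (fun s v => PySem.Set.union s (memo.getD v PySem.Set.empty)) (PySem.Set.ofList [u]))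
    else memo) memo

def build_idt_alt (parent : List (Int × Int)) : List (Int × List Int) :=
  let d := pvDictOf parent
  let ch := pvChildren d
  -- dep = {i: depth(i) for i in parent}
  let dep : PySem.Dict Int Nat :=
    d.keys.foldl (fun a i => a.insert i (pvDepth d d.keys.length i)) PySem.Dict.empty
  -- max(dep.values(), default=0)  (values are non-negative counts)
  let m := dep.values.foldl Nat.max 0
  -- for lev in range(m, -1, -1):  ==  fold over [m, m-1, …, 0]
  let memo := ((List.range (m + 1)).reverse).foldl
      (fun memo lev => pvLevelPass ch dep d.keys lev memo) PySem.Dict.empty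
  -- {i: memo[i] for i in parent}  (memo[i] exists for every key under Pre_)
  (d.keys.foldl (fun out i => out.insert i (memo.getD i PySem.Set.empty))
      (PySem.Dict.empty : PySem.Dict Int (List Int))).items

-- ===== PRECONDITION & SPEC =====
-- length of the ancestor chain of x (climbing the parent map), none if it does not leave
-- the dict within the given number of steps
def pvClimb (d : PySem.Dict Int Int) : Nat → Int → Option Nat
  | 0, x => match d.get? x with | none => some 0 | some _ => none
  | f+1, x => match d.get? x with
      | none => some 0
      | some p => (pvClimb d f p).map (· + 1)

-- Pre_ excludes exactly the cyclic parent maps, on which Python A's dfs recurses forever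
-- (RecursionError) and B's depth loop never terminates: every key's ancestor chain must
-- leave the key set (within |keys| steps, which acyclicity guarantees).
def Pre_build_idt (parent : List (Int × Int)) : Prop :=
  ∀ i ∈ (pvDictOf parent).keys,
    (pvClimb (pvDictOf parent) (pvDictOf parent).keys.length i).isSome = true
instance (parent : List (Int × Int)) : Decidable (Pre_build_idt parent) := by
  unfold Pre_build_idt; infer_instance

def pvWitness_build_idt : (List (Int × Int)) := [(1, 0), (2, 1), (3, 1)]

def Spec_build_idt (parent : List (Int × Int)) (out : List (Int × List Int)) : Prop := out = build_idt_alt parent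
instance (parent : List (Int × Int)) (out : List (Int × List Int)) : Decidable (Spec_build_idt parent out) := by unfold Spec_build_idt; infer_instance

-- ===== CLAIM (what is proved, stated in full; the proofs are below) =====
def Claim_equal_build_idt : Prop := ∀ (parent : List (Int × Int)), Dom_build_idt parent → Pre_build_idt parent → Spec_build_idt parent (build_idt parent)

-- ===== LEMMAS AND PROOFS =====

-- children characterization
theorem pvChildren_getD (d : PySem.Dict Int Int) (u : Int) :
    (pvChildren d).getD u [] = (d.items.filter (fun ip => ip.2 == u)).map (·.1) := by
  have aux : ∀ (l : List (Int × Int)) (acc : PySem.Dict Int (List Int)) (u : Int),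
      (l.foldl (fun ch ip => ch.modify ip.2 [] (fun s => s ++ [ip.1])) acc).getD u []
        = acc.getD u [] ++ (l.filter (fun ip => ip.2 == u)).map (·.1) := by
    intro l
    induction l with
    | nil => intro acc u; simp
    | cons p t ih =>
        intro acc u
        rw [List.foldl_cons, ih]
        by_cases h : p.2 = u
        · rw [PySem.Dict.getD_modify, if_pos h.symm]
          simp [h]
        · have hne : u ≠ p.2 := fun hh => h hh.symm
          rw [PySem.Dict.getD_modify, if_neg hne]
          simp [h]
  show (d.items.foldl (fun ch ip => ch.modify ip.2 [] (fun s => s ++ [ip.1])) PySem.Dict.empty).getD u [] = _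
  rw [aux]
  simp [PySem.Dict.getD_empty]

theorem pvChildren_mem (d : PySem.Dict Int Int) (hk : d.keys.Nodup) {u v : Int}
    (hv : v ∈ (pvChildren d).getD u []) : d.get? v = some u := by
  rw [pvChildren_getD] at hv
  rcases List.mem_map.mp hv with ⟨ip, hip, hfst⟩
  rcases List.mem_filter.mp hip with ⟨hmem, hsnd⟩
  have : ip = (v, u) := by
    cases ip
    simp_all
  subst this
  exact PySem.Dict.get?_of_mem_items d hmem hk

-- climb facts
theorem pvClimb_le (d : PySem.Dict Int Int) :
    ∀ (f : Nat) (x : Int) (k : Nat), pvClimb d f x = some k → k ≤ f := by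
  intro f
  induction f with
  | zero =>
      intro x k h
      unfold pvClimb at h
      cases hg : d.get? x <;> (simp [hg] at h; try omega)
  | succ f ih =>
      intro x k h
      cases hg : d.get? x with
      | none => simp [pvClimb, hg] at h; omega
      | some p =>
          simp only [pvClimb, hg] at h
          cases hc : pvClimb d f p with
          | none => simp [hc] at h
          | some m =>
              simp [hc] at h
              have := ih p m hc
              omega

theorem pvClimb_succ (d : PySem.Dict Int Int) :
    ∀ (f : Nat) (x : Int) (k : Nat), pvClimb d f x = some k → pvClimb d (f+1) x = some k := by
  intro f
  induction f with
  | zero =>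
      intro x k h
      unfold pvClimb at h ⊢
      cases hg : d.get? x <;> (simp [hg] at h ⊢; try omega)
  | succ f ih =>
      intro x k h
      cases hg : d.get? x with
      | none => simp only [pvClimb, hg] at h ⊢; exact h
      | some p =>
          simp only [pvClimb, hg] at h
          cases hc : pvClimb d f p with
          | none => simp [hc] at h
          | some m =>
              simp [hc] at h
              have h2 : pvClimb d (f+1) p = some m := ih p m hc
              show (match d.get? x with
                    | none => some 0
                    | some p => (pvClimb d (f+1) p).map (· + 1)) = some k
              rw [hg]
              simp [h2, h]

-- a child of u is itself a key, one step deeper on its ancestor chain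
theorem pvChild_climb (d : PySem.Dict Int Int) (hk : d.keys.Nodup)
    (HP : ∀ i ∈ d.keys, (pvClimb d d.keys.length i).isSome = true)
    {u v : Int} {c : Nat} (hc : pvClimb d d.keys.length u = some c)
    (hv : v ∈ (pvChildren d).getD u []) :
    v ∈ d.keys ∧ pvClimb d d.keys.length v = some (c + 1) ∧ c + 1 ≤ d.keys.length := by
  have hgv : d.get? v = some u := pvChildren_mem d hk hv
  have hvk : v ∈ d.keys := by
    by_contra hnk
    rw [(PySem.Dict.get?_eq_none_iff_not_mem_keys d v).mpr hnk] at hgv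
    cases hgv
  obtain ⟨n', hn'⟩ : ∃ n', d.keys.length = n' + 1 :=
    ⟨d.keys.length - 1, by have := List.length_pos_of_mem hvk; omega⟩
  have hm := HP v hvk
  rw [Option.isSome_iff_exists] at hm
  obtain ⟨m, hm⟩ := hm
  rw [hn'] at hm
  simp only [pvClimb, hgv] at hm
  cases hcu : pvClimb d n' u with
  | none => rw [hcu] at hm; cases hm
  | some m' =>
      have h1 : pvClimb d (n' + 1) u = some m' := pvClimb_succ d n' u m' hcu
      rw [← hn'] at h1
      rw [hc] at h1
      have hcm : m' = c := by injection h1 with h1'; exact h1'.symm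
      have hcv : pvClimb d (n' + 1) v = some (m' + 1) := by
        simp only [pvClimb, hgv, hcu, Option.map]
      refine ⟨hvk, ?_, ?_⟩
      · rw [hn', hcv, hcm]
      · have := pvClimb_le d n' u m' hcu
        omega

-- Source B's depth loop computes exactly the climb length wherever the climb terminates
theorem pvDepth_eq_climb (d : PySem.Dict Int Int) :
    ∀ (f : Nat) (x : Int) (c : Nat), pvClimb d f x = some c → pvDepth d f x = c := by
  intro f
  induction f with
  | zero =>
      intro x c h
      unfold pvClimb at h
      cases hg : d.get? x <;> simp [hg] at h
      simp [pvDepth, h]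
  | succ f ih =>
      intro x c h
      cases hg : d.get? x with
      | none =>
          simp only [pvClimb, hg] at h
          injection h with h
          simp [pvDepth, hg, ← h]
      | some p =>
          simp only [pvClimb, hg] at h
          cases hc : pvClimb d f p with
          | none => simp [hc] at h
          | some m =>
              simp [hc] at h
              have := ih p m hc
              simp [pvDepth, hg, this, ← h]

-- the dict {i: f(i) for i in ks}, looked up
theorem pvFunDict_get? {β : Type} (f : Int → β) :
    ∀ (ks : List Int) (a : PySem.Dict Int β) (u : Int),
      (ks.foldl (fun a i => a.insert i (f i)) a).get? u
        = if u ∈ ks then some (f u) else a.get? u := by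
  intro ks
  induction ks with
  | nil => intro a u; simp
  | cons i t ih =>
      intro a u
      rw [List.foldl_cons, ih]
      by_cases ht : u ∈ t
      · simp [ht]
      · by_cases hi : u = i
        · subst hi
          simp [ht, PySem.Dict.get?_insert_self]
        · have := PySem.Dict.get?_insert_of_ne a (f i) hi
          simp [ht, hi, this]

theorem pvFunDict_getD {β : Type} (f : Int → β) (d0 : β) :
    ∀ (ks : List Int) (a : PySem.Dict Int β) (u : Int),
      (ks.foldl (fun a i => a.insert i (f i)) a).getD u d0
        = if u ∈ ks then f u else a.getD u d0 := by
  intro ks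
  induction ks with
  | nil => intro a u; simp
  | cons i t ih =>
      intro a u
      rw [List.foldl_cons, ih]
      by_cases ht : u ∈ t
      · simp [ht]
      · by_cases hi : u = i
        · subst hi
          simp [ht, PySem.Dict.getD_insert_self]
        · have := PySem.Dict.getD_insert_of_ne a (f i) d0 hi
          simp [ht, hi, this]

-- every element of a Nat list is bounded by its foldl-max
theorem pv_le_foldl_max : ∀ (l : List Nat) (a x : Nat), x ∈ l → x ≤ l.foldl Nat.max a := by
  intro l
  induction l with
  | nil => intro a x h; cases h
  | cons y t ih =>
      intro a x h
      rcases List.mem_cons.mp h with h | h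
      · subst h
        have : ∀ (l : List Nat) (a b : Nat), a ≤ b → a ≤ l.foldl Nat.max b := by
          intro l
          induction l with
          | nil => intro a b h; simpa using h
          | cons z t ih2 => intro a b h; exact ih2 a (Nat.max b z) (le_trans h (Nat.le_max_left _ _))
        exact this t x (Nat.max a x) (Nat.le_max_right _ _)
      · exact ih (Nat.max a y) x h

-- fuel stability of pvDfsA under Pre_ (acyclicity), by induction on n - climb
theorem pvDfsA_stable (d : PySem.Dict Int Int) (hk : d.keys.Nodup)
    (HP : ∀ i ∈ d.keys, (pvClimb d d.keys.length i).isSome = true) :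
    ∀ (μ : Nat) (u : Int) (c : Nat), u ∈ d.keys → pvClimb d d.keys.length u = some c →
      d.keys.length - c ≤ μ →
      ∀ f g : Nat, d.keys.length - c < f → d.keys.length - c < g →
        pvDfsA (pvChildren d) f u = pvDfsA (pvChildren d) g u := by
  intro μ
  induction μ with
  | zero =>
      intro u c hu hc hμ f g hf hg
      obtain ⟨f', rfl⟩ : ∃ f', f = f' + 1 := ⟨f - 1, by omega⟩
      obtain ⟨g', rfl⟩ : ∃ g', g = g' + 1 := ⟨g - 1, by omega⟩
      have hempty : (pvChildren d).getD u [] = [] := by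
        cases hL : (pvChildren d).getD u [] with
        | nil => rfl
        | cons v t =>
            exfalso
            have hv : v ∈ (pvChildren d).getD u [] := by rw [hL]; exact List.mem_cons_self
            obtain ⟨_, _, hle⟩ := pvChild_climb d hk HP hc hv
            have := pvClimb_le d d.keys.length u c hc
            omega
      simp [pvDfsA, hempty]
  | succ μ ih =>
      intro u c hu hc hμ f g hf hg
      obtain ⟨f', rfl⟩ : ∃ f', f = f' + 1 := ⟨f - 1, by omega⟩
      obtain ⟨g', rfl⟩ : ∃ g', g = g' + 1 := ⟨g - 1, by omega⟩
      show ((pvChildren d).getD u []).foldl (fun s v => PySem.Set.union s (pvDfsA (pvChildren d) f' v)) (PySem.Set.ofList [u])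
        = ((pvChildren d).getD u []).foldl (fun s v => PySem.Set.union s (pvDfsA (pvChildren d) g' v)) (PySem.Set.ofList [u])
      apply PySem.List.foldl_congr_mem
      intro acc v hv
      obtain ⟨hvk, hclv, hle⟩ := pvChild_climb d hk HP hc hv
      rw [ih v (c + 1) hvk hclv (by omega) f' g' (by omega) (by omega)]

-- one inner scan at level lev: afterwards every key of depth ≥ lev is cached correctly
theorem pvLevelPass_inv (d : PySem.Dict Int Int) (hk : d.keys.Nodup)
    (HP : ∀ i ∈ d.keys, (pvClimb d d.keys.length i).isSome = true) :
    ∀ (ks : List Int), (∀ x ∈ ks, x ∈ d.keys) → ∀ (lev : Nat) (memo : PySem.Dict Int (PySem.Set Int)),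
      (∀ v ∈ d.keys, lev + 1 ≤ pvDepth d d.keys.length v →
        memo.getD v PySem.Set.empty = pvDfsA (pvChildren d) (d.keys.length + 1) v) →
      (∀ u ∈ d.keys, pvDepth d d.keys.length u = lev → u ∉ ks →
        memo.getD u PySem.Set.empty = pvDfsA (pvChildren d) (d.keys.length + 1) u) →
      ∀ v ∈ d.keys, lev ≤ pvDepth d d.keys.length v →
        (pvLevelPass (pvChildren d)
            (d.keys.foldl (fun a i => a.insert i (pvDepth d d.keys.length i)) PySem.Dict.empty)
            ks lev memo).getD v PySem.Set.empty
          = pvDfsA (pvChildren d) (d.keys.length + 1) v := by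
  intro ks
  induction ks with
  | nil =>
      intro _ lev memo H1 H2 v hv hlev
      show memo.getD v PySem.Set.empty = _
      by_cases he : pvDepth d d.keys.length v = lev
      · exact H2 v hv he (by simp)
      · exact H1 v hv (by omega)
  | cons u t ih =>
      intro hks lev memo H1 H2 v hv hlev
      have hu : u ∈ d.keys := hks u List.mem_cons_self
      have hdep : (d.keys.foldl (fun a i => a.insert i (pvDepth d d.keys.length i)) PySem.Dict.empty).getD u 0
          = pvDepth d d.keys.length u := by
        rw [pvFunDict_getD]
        simp [hu]
      have hstep : pvLevelPass (pvChildren d)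
            (d.keys.foldl (fun a i => a.insert i (pvDepth d d.keys.length i)) PySem.Dict.empty)
            (u :: t) lev memo
          = pvLevelPass (pvChildren d)
            (d.keys.foldl (fun a i => a.insert i (pvDepth d d.keys.length i)) PySem.Dict.empty)
            t lev
            (if (((d.keys.foldl (fun a i => a.insert i (pvDepth d d.keys.length i)) PySem.Dict.empty).getD u 0) == lev) = true then
               memo.insert u (((pvChildren d).getD u []).foldl
                 (fun s w => PySem.Set.union s (memo.getD w PySem.Set.empty)) (PySem.Set.ofList [u]))
             else memo) := rfl
      rw [hstep, hdep]
      by_cases hul : pvDepth d d.keys.length u = lev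
      · -- u is processed at this level: memo gains the correct set for u
        rw [if_pos (by simp [hul])]
        have hcu : pvClimb d d.keys.length u = some lev := by
          have h := HP u hu
          rw [Option.isSome_iff_exists] at h
          obtain ⟨c, hc⟩ := h
          have hdc := pvDepth_eq_climb d d.keys.length u c hc
          have hcl : c = lev := by omega
          subst hcl
          exact hc
        have hval : ((pvChildren d).getD u []).foldl
              (fun s w => PySem.Set.union s (memo.getD w PySem.Set.empty)) (PySem.Set.ofList [u])
            = pvDfsA (pvChildren d) (d.keys.length + 1) u := by
          show _ = ((pvChildren d).getD u []).foldl
              (fun s w => PySem.Set.union s (pvDfsA (pvChildren d) d.keys.length w)) (PySem.Set.ofList [u])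
          apply PySem.List.foldl_congr_mem
          intro acc w hw
          obtain ⟨hwk, hclw, hle⟩ := pvChild_climb d hk HP hcu hw
          have hdw : pvDepth d d.keys.length w = lev + 1 := pvDepth_eq_climb d _ w _ hclw
          rw [H1 w hwk (by omega)]
          rw [pvDfsA_stable d hk HP (d.keys.length - (lev + 1)) w (lev + 1) hwk hclw (by omega)
            (d.keys.length + 1) d.keys.length (by omega) (by omega)]
        apply ih (fun x hx => hks x (List.mem_cons_of_mem u hx)) lev _ ?_ ?_ v hv hlev
        · intro w hw hlw
          by_cases hwu : w = u
          · subst hwu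
            omega
          · rw [PySem.Dict.getD_insert_of_ne _ _ _ hwu]
            exact H1 w hw hlw
        · intro w hw hlw hwt
          by_cases hwu : w = u
          · subst hwu
            rw [PySem.Dict.getD_insert_self]
            exact hval
          · rw [PySem.Dict.getD_insert_of_ne _ _ _ hwu]
            exact H2 w hw hlw (by simp [hwu, hwt])
      · -- u is not at this level: memo unchanged at this step
        rw [if_neg (by simp [hul])]
        apply ih (fun x hx => hks x (List.mem_cons_of_mem u hx)) lev memo H1 ?_ v hv hlev
        intro w hw hlw hwt
        apply H2 w hw hlw
        simp only [List.mem_cons, not_or]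
        exact ⟨fun hwu => hul (hwu ▸ hlw), hwt⟩

-- the whole level loop, from level m down to 0
theorem pvOuter (d : PySem.Dict Int Int) (hk : d.keys.Nodup)
    (HP : ∀ i ∈ d.keys, (pvClimb d d.keys.length i).isSome = true) :
    ∀ (m : Nat) (memo : PySem.Dict Int (PySem.Set Int)),
      (∀ v ∈ d.keys, m + 1 ≤ pvDepth d d.keys.length v →
        memo.getD v PySem.Set.empty = pvDfsA (pvChildren d) (d.keys.length + 1) v) →
      ∀ v ∈ d.keys,
        (((List.range (m + 1)).reverse).foldl
            (fun memo lev => pvLevelPass (pvChildren d)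
              (d.keys.foldl (fun a i => a.insert i (pvDepth d d.keys.length i)) PySem.Dict.empty)
              d.keys lev memo) memo).getD v PySem.Set.empty
          = pvDfsA (pvChildren d) (d.keys.length + 1) v := by
  intro m
  induction m with
  | zero =>
      intro memo H1 v hv
      have : (List.range 1).reverse = [0] := by decide
      rw [this]
      exact pvLevelPass_inv d hk HP d.keys (fun x hx => hx) 0 memo H1
        (fun u hu _ hnk => absurd hu hnk) v hv (Nat.zero_le _)
  | succ m ih =>
      intro memo H1 v hv
      have hsplit : (List.range (m + 2)).reverse = (m + 1) :: (List.range (m + 1)).reverse := by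
        rw [List.range_succ, List.reverse_append]
        rfl
      rw [hsplit, List.foldl_cons]
      refine ih _ ?_ v hv
      intro w hw hlw
      exact pvLevelPass_inv d hk HP d.keys (fun x hx => hx) (m + 1) memo H1
        (fun u hu _ hnk => absurd hu hnk) w hw (by omega)

-- ===== VERDICT (by name: the statement is the Claim_ definition above) =====
theorem build_idt_spec : Claim_equal_build_idt := by
  intro parent _hdom hpre
  show build_idt parent = build_idt_alt parent
  unfold build_idt build_idt_alt
  have hk : (pvDictOf parent).keys.Nodup := by
    show (PySem.Dict.ofList parent).keys.Nodup
    exact PySem.Dict.nodup_keys_ofList parent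
  have HP : ∀ i ∈ (pvDictOf parent).keys,
      (pvClimb (pvDictOf parent) (pvDictOf parent).keys.length i).isSome = true := hpre
  refine congrArg PySem.Dict.items ?_
  apply PySem.List.foldl_congr_mem
  intro acc i hi
  refine congrArg (acc.insert i) ?_
  -- every key's depth is bounded by the fold-max of dep.values
  have hbound : ∀ v ∈ (pvDictOf parent).keys,
      pvDepth (pvDictOf parent) (pvDictOf parent).keys.length v
        ≤ (((pvDictOf parent).keys.foldl
            (fun a i => a.insert i (pvDepth (pvDictOf parent) (pvDictOf parent).keys.length i))
            PySem.Dict.empty).values).foldl Nat.max 0 := by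
    intro v hv
    apply pv_le_foldl_max
    have hg : ((pvDictOf parent).keys.foldl
        (fun a i => a.insert i (pvDepth (pvDictOf parent) (pvDictOf parent).keys.length i))
        PySem.Dict.empty).get? v
          = some (pvDepth (pvDictOf parent) (pvDictOf parent).keys.length v) := by
      rw [pvFunDict_get?]
      simp [hv]
    have hmem := PySem.Dict.mem_items_of_get?_eq_some _ hg
    show _ ∈ PySem.Dict.values _
    simp only [PySem.Dict.values, List.mem_map]
    exact ⟨_, hmem, rfl⟩
  have := pvOuter (pvDictOf parent) hk HP
      ((((pvDictOf parent).keys.foldl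
          (fun a i => a.insert i (pvDepth (pvDictOf parent) (pvDictOf parent).keys.length i))
          PySem.Dict.empty).values).foldl Nat.max 0)
      PySem.Dict.empty
      (fun v hv hlv => absurd (hbound v hv) (by omega))
      i hi
  rw [this]
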